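-- pv_equiv track=rewrite | github.com/oeick/advent-of-code | 2020/06/python/main.py | solve
-- ===== SOURCE A (Python) =====
-- def solve(lines: list[str]) -> (int, int):
--     count1, count2 = 0, 0
--     group = []
--     for line in lines + ['']:
--         if line:
--             group.append(line)
--         elif len(group) > 0:
--             count1 += len(set(''.join(group)))
--             count2 += len(set.intersection(*[set(line) for line in group]))
--             group = []
--     return count1, count2
-- ===== SOURCE B (Python) =====
-- def solve(lines: list[str]) -> (int, int):
--     # Index scan with a per-group character -> number-of-lines-containing-it
--     # dictionary: no group lists, no set union/join, no set.intersection.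
--     # Union size = len of the dict; intersection size = number of characters
--     # whose count equals the group's number of lines.
--     count1, count2 = 0, 0
--     i, n = 0, len(lines)
--     while i < n:
--         if not lines[i]:
--             i += 1
--             continue
--         seen = {}
--         size = 0
--         while i < n and lines[i]:
--             for ch in set(lines[i]):
--                 seen[ch] = seen.get(ch, 0) + 1
--             size += 1
--             i += 1
--         count1 += len(seen)
--         count2 += sum(1 for v in seen.values() if v == size)
--     return count1, count2
-- ===== Notes on version B (the rewrite author's own statement) =====
-- stated objective: alternative
-- what changed: A materialises each group's lines and takes the sizes of a set union (via join) and of set.intersection inside one sentinel-terminated loop; B never builds group lists or per-line sets to intersect: it scans with an index and maintains a per-group character-to-line-count dictionary, reading the union size as the dict's size and the intersection size as the number of characters whose count equals the group's line count.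
import Mathlib
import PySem

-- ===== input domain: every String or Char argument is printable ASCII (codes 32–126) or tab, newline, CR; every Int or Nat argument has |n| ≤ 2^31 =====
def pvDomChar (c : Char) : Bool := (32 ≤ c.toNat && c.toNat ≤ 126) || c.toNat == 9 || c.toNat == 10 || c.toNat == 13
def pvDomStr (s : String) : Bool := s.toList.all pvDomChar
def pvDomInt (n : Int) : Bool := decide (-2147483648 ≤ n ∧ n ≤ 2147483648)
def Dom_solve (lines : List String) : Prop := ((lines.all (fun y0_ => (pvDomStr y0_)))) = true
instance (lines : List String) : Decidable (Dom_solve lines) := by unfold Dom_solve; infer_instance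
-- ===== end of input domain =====

-- B replaces A's group lists with their set union (join) and set.intersection by an
-- index scan keeping a per-group character→line-count dictionary: union size = dict
-- size, intersection size = number of characters whose count equals the group's line count.

-- ===== PORT A =====
-- len(set(''.join(group)))
def c1fn (group : List String) : Int :=
  PySem.Set.len (PySem.Set.ofList (PySem.Str.join "" group).toList)

-- len(set.intersection(*[set(line) for line in group])); the [] case is
-- unreachable in both programs (the guard ensures group is nonempty).
def c2fn (group : List String) : Int :=
  match group.map (fun l => PySem.Set.ofList l.toList) with
  | [] => 0
  | s :: rest => PySem.Set.len (rest.foldl PySem.Set.inter s)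

def solveStep (st : (Int × Int) × List String) (line : String) : (Int × Int) × List String :=
  if line ≠ "" then (st.1, st.2 ++ [line])
  else if st.2.length > 0 then ((st.1.1 + c1fn st.2, st.1.2 + c2fn st.2), [])
  else st

def solve (lines : List String) : Int × Int :=
  ((lines ++ [""]).foldl solveStep ((0, 0), [])).1

-- ===== PORT B =====
-- for ch in set(lines[i]): seen[ch] = seen.get(ch, 0) + 1
def countStep (d : PySem.Dict Char Int) (line : String) : PySem.Dict Char Int :=
  (PySem.Set.ofList line.toList).foldl (fun d ch => d.modify ch 0 (· + 1)) d

-- the inner 'while i < n and lines[i]': consume the nonempty run, counting lines per char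
def scanGroup : List String → PySem.Dict Char Int → Int → PySem.Dict Char Int × Int × List String
  | [], d, size => (d, size, [])
  | l :: ls, d, size =>
    if l = "" then (d, size, l :: ls)
    else scanGroup ls (countStep d l) (size + 1)

-- sum(1 for v in seen.values() if v == size)
def countFull (d : PySem.Dict Char Int) (size : Int) : Int :=
  d.values.foldl (fun a v => if v == size then a + 1 else a) 0

theorem scanGroup_rest_le : ∀ (xs : List String) (d : PySem.Dict Char Int) (k : Int),
    (scanGroup xs d k).2.2.length ≤ xs.length := by
  intro xs
  induction xs with
  | nil => intro d k; simp [scanGroup]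
  | cons l ls ih =>
    intro d k
    by_cases h : l = ""
    · simp [scanGroup, h]
    · simpa [scanGroup, h] using Nat.le_succ_of_le (ih (countStep d l) (k + 1))

-- the outer 'while i < n' loop carrying (count1, count2)
def altGo : List String → Int × Int → Int × Int
  | [], acc => acc
  | l :: ls, acc =>
    if l = "" then altGo ls acc
    else
      let r := scanGroup (l :: ls) PySem.Dict.empty 0
      altGo r.2.2 (acc.1 + (r.1.size : Int), acc.2 + countFull r.1 r.2.1)
termination_by lines _ => lines.length
decreasing_by
  · simp
  · simp only [scanGroup, if_neg (by assumption)]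
    exact Nat.lt_succ_of_le (scanGroup_rest_le _ _ _)

def solve_alt (lines : List String) : Int × Int := altGo lines (0, 0)

-- ===== PRECONDITION & SPEC =====
def Spec_solve (lines : List String) (out : Int × Int) : Prop := out = solve_alt lines
instance (lines : List String) (out : Int × Int) : Decidable (Spec_solve lines out) := by unfold Spec_solve; infer_instance

-- ===== CLAIM (what is proved, stated in full; the proofs are below) =====
def Claim_equal_solve : Prop := ∀ (lines : List String), Dom_solve lines → Spec_solve lines (solve lines)

-- ===== LEMMAS AND PROOFS =====

-- The group structure both programs follow, as a structural recursion.
def groupsRec : List String → List String → List (List String)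
  | [], cur => if cur ≠ [] then [cur] else []
  | l :: ls, cur =>
    if l ≠ "" then groupsRec ls (cur ++ [l])
    else if cur ≠ [] then cur :: groupsRec ls [] else groupsRec ls []

-- per-group values B computes (proof-side names)
def flatChars (g : List String) : List Char := g.flatMap (fun l => PySem.List.dedup l.toList)

def b1fn (g : List String) : Int := ((PySem.Dict.counter (flatChars g)).size : Int)

def b2fn (g : List String) : Int := countFull (PySem.Dict.counter (flatChars g)) (g.length : Int)

-- ---- A's loop in terms of groupsRec ----
theorem solve_loop (lines : List String) : ∀ (c1 c2 : Int) (group : List String),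
    ((lines ++ [""]).foldl solveStep ((c1, c2), group)).1 =
      (c1 + ((groupsRec lines group).map c1fn).sum,
       c2 + ((groupsRec lines group).map c2fn).sum) := by
  induction lines with
  | nil =>
    intro c1 c2 group
    by_cases h : group = []
    · simp [groupsRec, solveStep, h]
    · have hlen : group.length > 0 := List.length_pos_iff.mpr h
      simp [groupsRec, solveStep, h, hlen]
  | cons l ls ih =>
    intro c1 c2 group
    rw [List.cons_append, List.foldl_cons]
    by_cases hl : l = ""
    · subst hl
      by_cases hc : group = []
      · subst hc
        rw [show solveStep ((c1, c2), ([] : List String)) "" = ((c1, c2), []) from by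
          simp [solveStep]]
        rw [ih]
        simp [groupsRec]
      · have hlen : group.length > 0 := List.length_pos_iff.mpr hc
        rw [show solveStep ((c1, c2), group) "" = ((c1 + c1fn group, c2 + c2fn group), []) from by
          simp [solveStep, hlen]]
        rw [ih]
        simp only [groupsRec, hc, if_neg, ne_eq, not_true_eq_false, not_false_eq_true, if_true,
          List.map_cons, List.sum_cons, Prod.mk.injEq]
        constructor <;> ring
    · rw [show solveStep ((c1, c2), group) l = ((c1, c2), group ++ [l]) from by
        simp [solveStep, hl]]
      rw [ih]
      simp [groupsRec, hl]

-- every group groupsRec emits is nonempty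
theorem groupsRec_ne_nil : ∀ (xs : List String) (cur : List String),
    ∀ g ∈ groupsRec xs cur, g ≠ [] := by
  intro xs
  induction xs with
  | nil =>
    intro cur g hg
    by_cases h : cur = [] <;> simp [groupsRec, h] at hg
    simp [hg, h]
  | cons l ls ih =>
    intro cur g hg
    by_cases hl : l = ""
    · by_cases hc : cur = []
      · simp [groupsRec, hl, hc] at hg; exact ih [] g hg
      · simp [groupsRec, hl, hc] at hg
        rcases hg with rfl | hg
        · exact hc
        · exact ih [] g hg
    · simp only [groupsRec, ne_eq, hl, not_false_eq_true, if_true] at hg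
      exact ih (cur ++ [l]) g hg

-- groupsRec with a nonempty accumulator finishes the current group at the next blank
theorem groupsRec_aux : ∀ (xs : List String) (cur : List String), cur ≠ [] →
    groupsRec xs cur =
      (cur ++ xs.takeWhile (fun s => s != "")) :: groupsRec (xs.dropWhile (fun s => s != "")) [] := by
  intro xs
  induction xs with
  | nil => intro cur hc; simp [groupsRec, hc]
  | cons x xs ih =>
    intro cur hc
    by_cases hx : x = ""
    · subst hx
      simp [groupsRec, hc]
    · simp only [groupsRec, ne_eq, hx, not_false_eq_true, if_true,
        List.takeWhile_cons, List.dropWhile_cons]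
      rw [ih (cur ++ [x]) (by simp)]
      simp [hx]

-- ---- B's scan in closed form ----
theorem scanGroup_eq : ∀ (xs : List String) (d : PySem.Dict Char Int) (k : Int),
    scanGroup xs d k =
      ((xs.takeWhile (fun s => s != "")).foldl countStep d,
       k + ((xs.takeWhile (fun s => s != "")).length : Int),
       xs.dropWhile (fun s => s != "")) := by
  intro xs
  induction xs with
  | nil => intro d k; simp [scanGroup]
  | cons l ls ih =>
    intro d k
    by_cases h : l = ""
    · simp [scanGroup, h]
    · simp only [scanGroup, h, List.takeWhile_cons, List.dropWhile_cons]
      rw [ih (countStep d l) (k + 1)]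
      simp [h]
      ring

-- folding countStep from the empty dict is Counter of the deduped characters
theorem foldl_countStep (p : List String) :
    p.foldl countStep PySem.Dict.empty = PySem.Dict.counter (flatChars p) := by
  rw [PySem.Dict.counter_eq_foldl, flatChars, List.foldl_flatMap]
  simp only [PySem.List.dedup_eq_ofList]
  rfl

-- each char's count in flatChars = number of lines containing it
theorem count_flatChars (g : List String) (c : Char) :
    (flatChars g).count c = g.countP (fun l => decide (c ∈ l.toList)) := by
  induction g with
  | nil => simp [flatChars]
  | cons l g ih =>
    simp only [flatChars, List.flatMap_cons, List.count_append, List.countP_cons] at *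
    rw [ih]
    by_cases h : c ∈ l.toList
    · rw [List.count_eq_one_of_mem (PySem.List.nodup_dedup _) ((PySem.List.mem_dedup _ _).mpr h)]
      simp [h]; omega
    · rw [List.count_eq_zero_of_not_mem (fun hm => h ((PySem.List.mem_dedup _ _).mp hm))]
      simp [h]

theorem mem_flatChars (g : List String) (c : Char) :
    c ∈ flatChars g ↔ ∃ l ∈ g, c ∈ l.toList := by
  simp [flatChars, List.mem_flatMap]

-- Chars.join with empty separator is flatten
theorem join_nil_sep (xss : List (List Char)) : PySem.Chars.join [] xss = xss.flatten := by
  simp [PySem.Chars.join, List.intercalate]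
  induction xss with
  | nil => rfl
  | cons x xs ih => cases xs <;> simp_all [List.intersperse]

-- membership in an intersection fold
theorem mem_foldl_inter (ts : List (PySem.Set Char)) (s : PySem.Set Char) (y : Char) :
    y ∈ ts.foldl PySem.Set.inter s ↔ y ∈ s ∧ ∀ t ∈ ts, y ∈ t := by
  induction ts generalizing s with
  | nil => simp
  | cons t ts ih =>
    rw [List.foldl_cons, ih, PySem.Set.mem_inter]
    simp; tauto

theorem nodup_foldl_inter (ts : List (PySem.Set Char)) (s : PySem.Set Char) (h : s.Nodup) :
    (ts.foldl PySem.Set.inter s).Nodup := by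
  induction ts generalizing s with
  | nil => exact h
  | cons t ts ih => exact ih _ (PySem.Set.nodup_inter s t h)

-- ---- the two per-group agreements ----
theorem b1fn_eq (g : List String) : b1fn g = c1fn g := by
  unfold b1fn c1fn
  have hsz : (PySem.Dict.counter (flatChars g)).size =
      (PySem.Set.ofList (flatChars g)).length := by
    have := PySem.Dict.keys_counter (flatChars g)
    simpa [PySem.Dict.keys, PySem.Dict.size] using congrArg List.length this
  rw [hsz]
  have hperm : (PySem.Set.ofList (flatChars g)).Perm
      (PySem.Set.ofList (PySem.Str.join "" g).toList) := by
    rw [List.perm_ext_iff_of_nodup (PySem.Set.nodup_ofList _) (PySem.Set.nodup_ofList _)]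
    intro c
    rw [PySem.Set.mem_ofList, PySem.Set.mem_ofList, mem_flatChars,
      PySem.Str.toList_join, show ("" : String).toList = [] from rfl, join_nil_sep]
    simp [List.mem_flatten]
  simp [PySem.Set.len, hperm.length_eq]

theorem b2fn_eq (g : List String) (hg : g ≠ []) : b2fn g = c2fn g := by
  obtain ⟨l0, gr, rfl⟩ := List.exists_cons_of_ne_nil hg
  unfold b2fn c2fn countFull
  rw [PySem.List.foldl_count_if]
  have hv : (PySem.Dict.counter (flatChars (l0 :: gr))).values =
      (PySem.Set.ofList (flatChars (l0 :: gr))).map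
        (fun k => (((flatChars (l0 :: gr)).count k : Int))) := by
    have := PySem.Dict.items_counter (flatChars (l0 :: gr))
    simpa [PySem.Dict.values, List.map_map, Function.comp] using congrArg (List.map Prod.snd) this
  rw [hv, List.countP_map]
  rw [List.countP_eq_length_filter]
  simp only [List.map_cons]
  have hF : ((PySem.Set.ofList (flatChars (l0 :: gr))).filter
      ((fun v => v == ((l0 :: gr).length : Int)) ∘
        fun k => ((flatChars (l0 :: gr)).count k : Int))).Nodup :=
    (PySem.Set.nodup_ofList _).filter _
  have hI : ((gr.map (fun l => PySem.Set.ofList l.toList)).foldl PySem.Set.inter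
      (PySem.Set.ofList l0.toList)).Nodup :=
    nodup_foldl_inter _ _ (PySem.Set.nodup_ofList _)
  have hmem : ∀ c : Char,
      c ∈ (PySem.Set.ofList (flatChars (l0 :: gr))).filter
        ((fun v => v == ((l0 :: gr).length : Int)) ∘
          fun k => ((flatChars (l0 :: gr)).count k : Int)) ↔
      c ∈ (gr.map (fun l => PySem.Set.ofList l.toList)).foldl PySem.Set.inter
        (PySem.Set.ofList l0.toList) := by
    intro c
    rw [List.mem_filter, mem_foldl_inter, PySem.Set.mem_ofList, PySem.Set.mem_ofList]
    constructor
    · rintro ⟨-, hp⟩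
      simp only [Function.comp, beq_iff_eq, Int.natCast_inj] at hp
      rw [count_flatChars] at hp
      have hall := List.countP_eq_length.mp hp
      refine ⟨by simpa using hall l0 (by simp), ?_⟩
      intro t ht
      rcases List.mem_map.mp ht with ⟨l, hl, rfl⟩
      rw [PySem.Set.mem_ofList]
      simpa using hall l (by simp [hl])
    · rintro ⟨h0, hall⟩
      have hin : ∀ l ∈ l0 :: gr, c ∈ l.toList := by
        intro l hl
        rcases hl with _ | hl
        · exact h0
        · have := hall (PySem.Set.ofList l.toList) (List.mem_map.mpr ⟨l, by assumption, rfl⟩)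
          rwa [PySem.Set.mem_ofList] at this
      constructor
      · exact (mem_flatChars (l0 :: gr) c).mpr ⟨l0, by simp, h0⟩
      · simp only [Function.comp, beq_iff_eq, Int.natCast_inj]
        rw [count_flatChars]
        exact List.countP_eq_length.mpr (fun l hl => by simpa using hin l hl)
  have hlen := ((List.perm_ext_iff_of_nodup hF hI).mpr hmem).length_eq
  rw [hlen]
  simp [PySem.Set.len]

-- ---- B's outer loop in terms of groupsRec ----
theorem altGo_eq : ∀ (n : Nat) (lines : List String), lines.length ≤ n → ∀ (acc : Int × Int),
    altGo lines acc = (acc.1 + ((groupsRec lines []).map b1fn).sum,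
                       acc.2 + ((groupsRec lines []).map b2fn).sum) := by
  intro n
  induction n with
  | zero =>
    intro lines h acc
    have : lines = [] := List.eq_nil_of_length_eq_zero (Nat.le_zero.mp h)
    subst this
    simp [altGo, groupsRec]
  | succ n ih =>
    intro lines h acc
    match lines with
    | [] => simp [altGo, groupsRec]
    | l :: ls =>
      by_cases hl : l = ""
      · subst hl
        rw [show altGo ("" :: ls) acc = altGo ls acc from by rw [altGo]; simp]
        rw [ih ls (by simpa using Nat.lt_succ_iff.mp (Nat.lt_of_lt_of_le (Nat.lt_succ_self _) h)) acc]
        simp [groupsRec]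
      · have hgr : groupsRec (l :: ls) [] =
            (l :: ls.takeWhile (fun s => s != "")) ::
              groupsRec (ls.dropWhile (fun s => s != "")) [] := by
          simp only [groupsRec, ne_eq, hl, not_false_eq_true, if_true, List.nil_append]
          rw [groupsRec_aux ls [l] (by simp)]
          simp
        have hdw : (ls.dropWhile (fun s => s != "")).length ≤ n :=
          le_trans (List.length_dropWhile_le _ _) (by simpa using h)
        rw [altGo]
        simp only [hl, ite_false]
        rw [scanGroup_eq]
        simp only [List.takeWhile_cons, List.dropWhile_cons, hl,
          ne_eq, not_false_eq_true, bne_iff_ne, if_true]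
        rw [foldl_countStep (l :: ls.takeWhile (fun s => s != ""))]
        rw [ih (ls.dropWhile (fun s => s != "")) hdw]
        rw [hgr]
        simp only [List.map_cons, List.sum_cons, b1fn, b2fn, flatChars, zero_add]
        simp [add_assoc]

-- ===== VERDICT (by name: the statement is the Claim_ definition above) =====
theorem solve_spec : Claim_equal_solve := by
  intro lines _
  show solve lines = solve_alt lines
  unfold solve solve_alt
  rw [solve_loop lines 0 0 [], altGo_eq lines.length lines le_rfl (0, 0)]
  have h1 : (groupsRec lines []).map b1fn = (groupsRec lines []).map c1fn :=
    List.map_congr_left (fun g _ => b1fn_eq g)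
  have h2 : (groupsRec lines []).map b2fn = (groupsRec lines []).map c2fn :=
    List.map_congr_left (fun g hg => b2fn_eq g (groupsRec_ne_nil lines [] g hg))
  rw [h1, h2]
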